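-- pv_equiv track=rewrite | github.com/jgkellymit/GENIE-SMEM | SMEM/createFMIndex.py | getOccuranceMatrix
-- ===== SOURCE A (Python) =====
-- def getOccuranceMatrix(BWT_array):
--     o_dic = {}
--     index = 0
--     for item in BWT_array:
--         if item not in o_dic:
--             o_dic[item] = [0]
--         item_list = o_dic[item]
--         while len(item_list) <= index:
--             item_list.append(item_list[-1])
--         item_list[-1] += 1
--
--         index += 1
--
--     # Extend everything to full matrix length
--     for key in o_dic:
--         item_list = o_dic[key]
--         while len(item_list) < index:
--             item_list.append(item_list[-1])
--
--     return o_dic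
-- ===== SOURCE B (Python) =====
-- def getOccuranceMatrix(BWT_array):
--     symbols = list(dict.fromkeys(BWT_array))
--     o_dic = {}
--     for s in symbols:
--         col = []
--         c = 0
--         for item in BWT_array:
--             if item == s:
--                 c += 1
--             col.append(c)
--         o_dic[s] = col
--     return o_dic
-- ===== Notes on version B (the rewrite author's own statement) =====
-- stated objective: simpler
-- what changed: Replaces A's single pass with per-symbol lazy gap-filling while-loops plus a final extension pass by first collecting the distinct symbols and then recomputing each symbol's full running-count column in one plain inner loop.
import Mathlib
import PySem

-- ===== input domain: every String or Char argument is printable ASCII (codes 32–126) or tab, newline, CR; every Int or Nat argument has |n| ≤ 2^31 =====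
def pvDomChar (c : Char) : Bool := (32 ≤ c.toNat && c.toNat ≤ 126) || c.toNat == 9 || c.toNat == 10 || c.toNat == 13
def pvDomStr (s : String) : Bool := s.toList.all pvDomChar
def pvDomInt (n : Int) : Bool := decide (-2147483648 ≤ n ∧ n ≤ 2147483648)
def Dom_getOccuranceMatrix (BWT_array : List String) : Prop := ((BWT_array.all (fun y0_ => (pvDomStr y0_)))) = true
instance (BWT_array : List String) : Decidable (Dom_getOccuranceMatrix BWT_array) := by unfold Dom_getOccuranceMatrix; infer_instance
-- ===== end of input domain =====

-- B replaces A's lazy gap-filling single pass by a per-symbol column recount; objective: simpler, same asymptotic cost.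


-- ===== PORT A =====
-- 'while len(item_list) < n: item_list.append(item_list[-1])' (the main loop calls it with n = index+1,
-- i.e. 'len <= index'; the final loop with n = index). item_list is never empty, so item_list[-1] is pyGetD _ (-1) 0.
def extendWhile (l : List Int) (n : Nat) : List Int :=
  if l.length < n then extendWhile (l ++ [PySem.List.pyGetD l (-1) 0]) n else l
termination_by n - l.length
decreasing_by simp; omega

-- 'item_list[-1] += 1' : set the last element (the list is never empty in A)
def incLast (l : List Int) : List Int := l.dropLast ++ [PySem.List.pyGetD l (-1) 0 + 1]

-- one iteration of A's main 'for item in BWT_array' loop; state = (o_dic, index)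
def aStep (st : PySem.Dict String (List Int) × Nat) (item : String) :
    PySem.Dict String (List Int) × Nat :=
  let d := if st.1.contains item then st.1 else st.1.insert item [0]
  let item_list := d.getD item []
  let item_list := extendWhile item_list (st.2 + 1)
  (d.insert item (incLast item_list), st.2 + 1)

def getOccuranceMatrix (BWT_array : List String) : List (String × List Int) :=
  let st := BWT_array.foldl aStep (PySem.Dict.empty, 0)
  -- final loop: extend every value in place to length index = map over the items
  (PySem.Dict.mk (st.1.items.map (fun p => (p.1, extendWhile p.2 st.2)))).items

-- ===== PORT B =====
-- body of B's inner loop: running count c, appending c for each item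
def altStep (s : String) (st : List Int × Int) (item : String) : List Int × Int :=
  let c := if item == s then st.2 + 1 else st.2
  (st.1 ++ [c], c)

def altCol (s : String) (xs : List String) : List Int :=
  (xs.foldl (altStep s) ([], 0)).1

def getOccuranceMatrix_alt (BWT_array : List String) : List (String × List Int) :=
  ((PySem.List.dedup BWT_array).foldl
      (fun d s => d.insert s (altCol s BWT_array)) PySem.Dict.empty).items

-- ===== PRECONDITION & SPEC =====
def Spec_getOccuranceMatrix (BWT_array : List String) (out : List (String × List Int)) : Prop := out = getOccuranceMatrix_alt BWT_array
instance (BWT_array : List String) (out : List (String × List Int)) : Decidable (Spec_getOccuranceMatrix BWT_array out) := by unfold Spec_getOccuranceMatrix; infer_instance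

-- ===== CLAIM (what is proved, stated in full; the proofs are below) =====
def Claim_equal_getOccuranceMatrix : Prop := ∀ (BWT_array : List String), Dom_getOccuranceMatrix BWT_array → Spec_getOccuranceMatrix BWT_array (getOccuranceMatrix BWT_array)

-- ===== LEMMAS AND PROOFS =====

-- state of B's inner fold after the whole list
theorem altState (s : String) (p : List String) :
    p.foldl (altStep s) ([], 0) = (altCol s p, (p.count s : Int)) := by
  induction p using List.reverseRecOn with
  | nil => simp [altCol]
  | append_singleton p x ih =>
      have hA : altCol s (p ++ [x]) = (altStep s (altCol s p, (p.count s : Int)) x).1 := by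
        simp only [altCol]
        rw [List.foldl_append, ih]
        simp [altStep]
      rw [List.foldl_append, ih, hA]
      simp only [List.count_append, List.count_singleton]
      by_cases h : x = s
      · subst h; push_cast; simp [altStep]
      · have hb : (x == s) = false := by simp [h]
        have hb2 : (s == x) = false := by simp [Ne.symm h]
        simp [altStep, hb]

theorem altCol_snoc (s x : String) (p : List String) :
    altCol s (p ++ [x]) = altCol s p ++ [((p ++ [x]).count s : Int)] := by
  have hA : altCol s (p ++ [x]) = (altStep s (altCol s p, (p.count s : Int)) x).1 := by
    simp only [altCol]
    rw [List.foldl_append, altState]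
    simp [altStep]
  rw [hA]
  simp only [List.count_append, List.count_singleton]
  by_cases h : x = s
  · subst h; push_cast; simp [altStep]
  · have hb : (x == s) = false := by simp [h]
    have hb2 : (s == x) = false := by simp [Ne.symm h]
    simp [altStep, hb]

theorem length_altCol (s : String) (p : List String) : (altCol s p).length = p.length := by
  induction p using List.reverseRecOn with
  | nil => simp [altCol]
  | append_singleton p x ih => rw [altCol_snoc]; simp [ih]

theorem extendWhile_spec (a : Int) (m : List Int) (n : Nat) :
    extendWhile (m ++ [a]) n = (m ++ [a]) ++ List.replicate (n - (m.length + 1)) a := by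
  by_cases h : (m ++ [a]).length < n
  · rw [extendWhile]
    simp only [h, if_true, PySem.List.pyGetD_neg_one_append_singleton]
    rw [extendWhile_spec a (m ++ [a]) n]
    have hn : n - (m.length + 1) = (n - ((m ++ [a]).length + 1)) + 1 := by
      simp only [List.length_append, List.length_cons, List.length_nil] at h ⊢
      omega
    rw [hn, List.replicate_succ, List.append_assoc]
    rfl
  · rw [extendWhile]
    simp only [h, if_false]
    simp only [List.length_append, List.length_cons, List.length_nil] at h
    have h0 : n - (m.length + 1) = 0 := by omega
    simp [h0]
termination_by n - m.length
decreasing_by simp only [List.length_append, List.length_cons, List.length_nil] at h ⊢; omega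

theorem incLast_snoc (a : Int) (m : List Int) : incLast (m ++ [a]) = m ++ [a + 1] := by
  simp [incLast, PySem.List.pyGetD_neg_one_append_singleton]

-- invariant carried for each stored list
def StoreInv (s : String) (p : List String) (l : List Int) : Prop :=
  l.length ≤ p.length ∧
  ∀ n, p.length ≤ n → extendWhile l n = altCol s p ++ List.replicate (n - p.length) ((p.count s : Int))

def MainInv (p : List String) (d : PySem.Dict String (List Int)) : Prop :=
  d.keys = PySem.List.dedup p ∧ ∀ s l, d.get? s = some l → StoreInv s p l

theorem altCol_of_not_mem (x : String) (p : List String) (h : x ∉ p) :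
    altCol x p = List.replicate p.length (0 : Int) := by
  induction p using List.reverseRecOn with
  | nil => simp [altCol]
  | append_singleton p y ih =>
      have hxp : x ∉ p := fun hm => h (List.mem_append_left _ hm)
      have hxy : x ≠ y := by rintro rfl; exact h (List.mem_append_right _ (List.mem_singleton_self x))
      rw [altCol_snoc, ih hxp]
      have hc : (p ++ [y]).count x = 0 := by
        simp [List.count_eq_zero]
        exact ⟨hxp, hxy⟩
      rw [hc]
      simp [List.replicate_succ']

theorem count_snoc_self (x : String) (p : List String) :
    (p ++ [x]).count x = p.count x + 1 := by
  simp

theorem count_snoc_ne (s x : String) (p : List String) (h : s ≠ x) :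
    (p ++ [x]).count s = p.count s := by
  have : ¬ x = s := Ne.symm h
  simp [this]

theorem storeInv_altCol (s : String) (q : List String) (hq : q ≠ []) :
    StoreInv s q (altCol s q) := by
  rcases List.eq_nil_or_concat q with rfl | ⟨r, y, rfl⟩
  · exact absurd rfl hq
  · rw [List.concat_eq_append]
    constructor
    · rw [length_altCol]
    · intro n hn
      rw [altCol_snoc, extendWhile_spec, length_altCol]
      simp

theorem dedup_snoc (p : List String) (x : String) :
    PySem.List.dedup (p ++ [x]) =
      if x ∈ p then PySem.List.dedup p else PySem.List.dedup p ++ [x] := by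
  have hx : (x ∈ List.foldl PySem.Set.add [] p) ↔ x ∈ p := by
    rw [← PySem.Set.ofList_eq_foldl]
    exact PySem.Set.mem_ofList (xs := p) (y := x)
  simp only [PySem.List.dedup_eq_ofList, PySem.Set.ofList_eq_foldl, List.foldl_append,
    List.foldl_cons, List.foldl_nil, PySem.Set.add]
  by_cases h : x ∈ p
  · simp [h, hx]
  · simp [h, hx]

theorem storeInv_snoc_ne (s x : String) (p : List String) (l : List Int) (h : s ≠ x)
    (hi : StoreInv s p l) : StoreInv s (p ++ [x]) l := by
  obtain ⟨h1, h2⟩ := hi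
  constructor
  · simp only [List.length_append, List.length_cons, List.length_nil]; omega
  · intro n hn
    simp only [List.length_append, List.length_cons, List.length_nil] at hn
    rw [h2 n (by omega), count_snoc_ne s x p h]
    have hrep : n - p.length = (n - (p.length + 1)) + 1 := by omega
    rw [hrep, List.replicate_succ, altCol_snoc, count_snoc_ne s x p h]
    simp

theorem main_loop (p : List String) :
    p.foldl aStep (PySem.Dict.empty, 0) =
      ((p.foldl aStep (PySem.Dict.empty, 0)).1, p.length) ∧
    MainInv p (p.foldl aStep (PySem.Dict.empty, 0)).1 := by
  induction p using List.reverseRecOn with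
  | nil =>
      refine ⟨rfl, rfl, ?_⟩
      intro s l hl
      simp [PySem.Dict.get?_empty] at hl
  | append_singleton p x ih =>
      obtain ⟨hpair, hkeys, hinv⟩ := ih
      rw [List.foldl_append, List.foldl_cons, List.foldl_nil, hpair]
      refine ⟨by simp [aStep], ?_⟩
      have hcont : (List.foldl aStep (PySem.Dict.empty, 0) p).1.contains x = true ↔ x ∈ p := by
        rw [PySem.Dict.contains_iff_mem_keys, hkeys, PySem.List.mem_dedup]
      by_cases hx : x ∈ p
      · -- repeated symbol: the stored list is extended and its last entry incremented
        have hct : (List.foldl aStep (PySem.Dict.empty, 0) p).1.contains x = true := hcont.mpr hx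
        obtain ⟨l, hl⟩ : ∃ l, (List.foldl aStep (PySem.Dict.empty, 0) p).1.get? x = some l := by
          have := PySem.Dict.contains_eq_isSome_get?
            (d := (List.foldl aStep (PySem.Dict.empty, 0) p).1) (k := x)
          rw [hct] at this
          exact Option.isSome_iff_exists.mp this.symm
        obtain ⟨hlen, hext⟩ := hinv x l hl
        have hgetD : (List.foldl aStep (PySem.Dict.empty, 0) p).1.getD x [] = l := by
          rw [PySem.Dict.getD_eq_get?_getD, hl]; rfl
        have hE : extendWhile l (p.length + 1) = altCol x p ++ [(p.count x : Int)] := by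
          rw [hext (p.length + 1) (by omega)]
          simp
        have hIncl : incLast (extendWhile l (p.length + 1)) = altCol x (p ++ [x]) := by
          rw [hE, incLast_snoc, altCol_snoc, count_snoc_self]
          push_cast
          simp
        simp only [aStep, hct, if_true, hgetD, hIncl]
        constructor
        · rw [PySem.Dict.keys_insert_of_contains _ _ hct, hkeys, dedup_snoc]
          simp [hx]
        · intro s l' hl'
          by_cases hs : s = x
          · subst hs
            rw [PySem.Dict.get?_insert_self] at hl'
            cases hl'
            exact storeInv_altCol s (p ++ [s]) (by simp)
          · rw [PySem.Dict.get?_insert_of_ne _ _ hs] at hl'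
            exact storeInv_snoc_ne s x p l' hs (hinv s l' hl')
      · -- first occurrence: [0] is inserted, extended with zeros, last becomes 1
        have hcf : (List.foldl aStep (PySem.Dict.empty, 0) p).1.contains x = false := by
          rw [← Bool.not_eq_true, hcont]; exact hx
        have hgetD : ((List.foldl aStep (PySem.Dict.empty, 0) p).1.insert x [0]).getD x [] = [0] := by
          rw [PySem.Dict.getD_insert_self]
        have hE : extendWhile [(0 : Int)] (p.length + 1) = List.replicate p.length (0 : Int) ++ [0] := by
          have h0 : [(0 : Int)] = [] ++ [(0 : Int)] := rfl
          rw [h0, extendWhile_spec]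
          simp [← List.replicate_succ, List.replicate_succ']
        have hIncl : incLast (extendWhile [(0 : Int)] (p.length + 1)) = altCol x (p ++ [x]) := by
          rw [hE, incLast_snoc, altCol_snoc, altCol_of_not_mem x p hx, count_snoc_self,
            List.count_eq_zero.mpr hx]
          simp
        simp only [aStep, hcf, Bool.false_eq_true, if_false, hgetD, hIncl]
        constructor
        · rw [PySem.Dict.keys_insert_of_contains _ _ (PySem.Dict.contains_insert_self _ _ _),
            PySem.Dict.keys_insert_of_not_contains _ _ hcf, hkeys, dedup_snoc]
          simp [hx]
        · intro s l' hl'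
          by_cases hs : s = x
          · subst hs
            rw [PySem.Dict.get?_insert_self] at hl'
            cases hl'
            exact storeInv_altCol s (p ++ [s]) (by simp)
          · rw [PySem.Dict.get?_insert_of_ne _ _ hs,
              PySem.Dict.get?_insert_of_ne _ _ hs] at hl'
            exact storeInv_snoc_ne s x p l' hs (hinv s l' hl')

-- ===== VERDICT (by name: the statement is the Claim_ definition above) =====
theorem getOccuranceMatrix_spec : Claim_equal_getOccuranceMatrix := by
  intro xs _
  obtain ⟨hpair, hkeys, hinv⟩ := main_loop xs
  have hsnd : (List.foldl aStep (PySem.Dict.empty, 0) xs).2 = xs.length := by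
    rw [hpair]
  have hnodup : (List.foldl aStep (PySem.Dict.empty, 0) xs).1.keys.Nodup := by
    rw [hkeys]; exact PySem.List.nodup_dedup xs
  show getOccuranceMatrix xs = getOccuranceMatrix_alt xs
  have hB : getOccuranceMatrix_alt xs =
      (PySem.List.dedup xs).map (fun s => (s, altCol s xs)) := by
    unfold getOccuranceMatrix_alt
    rw [PySem.Dict.items_foldl_insert_fresh (PySem.List.dedup xs) (fun s => s)
      (fun s => altCol s xs) PySem.Dict.empty
      (fun a _ => PySem.Dict.contains_empty a)
      (by simp only [List.map_id']; exact PySem.List.nodup_dedup xs)]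
    simp [PySem.Dict.empty]
  rw [hB]
  unfold getOccuranceMatrix
  simp only [hsnd]
  have hmap : ∀ pr ∈ (List.foldl aStep (PySem.Dict.empty, 0) xs).1.items,
      (pr.1, extendWhile pr.2 xs.length) = (pr.1, altCol pr.1 xs) := by
    rintro ⟨k, v⟩ hpr
    have hget := PySem.Dict.get?_of_mem_items _ hpr hnodup
    obtain ⟨hlen, hext⟩ := hinv k v hget
    have := hext xs.length (le_refl _)
    simp only [Nat.sub_self, List.replicate_zero, List.append_nil] at this
    simp [this]
  rw [List.map_congr_left hmap]
  have hfst : (List.foldl aStep (PySem.Dict.empty, 0) xs).1.items.map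
      (fun pr => (pr.1, altCol pr.1 xs)) =
      ((List.foldl aStep (PySem.Dict.empty, 0) xs).1.items.map Prod.fst).map
        (fun s => (s, altCol s xs)) := by
    rw [List.map_map]
    rfl
  rw [hfst]
  have hk : (List.foldl aStep (PySem.Dict.empty, 0) xs).1.items.map Prod.fst =
      (List.foldl aStep (PySem.Dict.empty, 0) xs).1.keys := rfl
  rw [hk, hkeys]
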